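-- pv_equiv track=rewrite | github.com/geomeza/machine-learning | analysis/signal_separation.py | transform_polynomial_data
-- ===== SOURCE A (Python) =====
-- def transform_polynomial_data(data, degree):
--     polynomial_dict = {str(i):[] for i in range(degree + 1)}
--     polynomial_dict.update({'y': []})
--     for x,y in data:
--         adjusted_data = [x**i for i in range(degree + 1)]
--         for i in range(degree + 1):
--             polynomial_dict[str(i)].append(adjusted_data[i])
--         polynomial_dict['y'].append(y)
--     return polynomial_dict
-- ===== SOURCE B (Python) =====
-- def transform_polynomial_data(data, degree):
--     xs = [x for x, _ in data]
--     result = {}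
--     col = [1] * len(xs)
--     for i in range(degree + 1):
--         result[str(i)] = col
--         col = [v * x for v, x in zip(col, xs)]
--     result['y'] = [y for _, y in data]
--     return result
-- ===== Notes on version B (the rewrite author's own statement) =====
-- stated objective: alternative
-- what changed: B never computes x**i: it builds the feature columns incrementally, starting from the all-ones column and obtaining each next column by elementwise multiplication of the previous column with xs (Horner-style cumulative products), inserting one full column per step, whereas A makes a row-wise pass recomputing every power x**i per row and appending to all columns.
import Mathlib
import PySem

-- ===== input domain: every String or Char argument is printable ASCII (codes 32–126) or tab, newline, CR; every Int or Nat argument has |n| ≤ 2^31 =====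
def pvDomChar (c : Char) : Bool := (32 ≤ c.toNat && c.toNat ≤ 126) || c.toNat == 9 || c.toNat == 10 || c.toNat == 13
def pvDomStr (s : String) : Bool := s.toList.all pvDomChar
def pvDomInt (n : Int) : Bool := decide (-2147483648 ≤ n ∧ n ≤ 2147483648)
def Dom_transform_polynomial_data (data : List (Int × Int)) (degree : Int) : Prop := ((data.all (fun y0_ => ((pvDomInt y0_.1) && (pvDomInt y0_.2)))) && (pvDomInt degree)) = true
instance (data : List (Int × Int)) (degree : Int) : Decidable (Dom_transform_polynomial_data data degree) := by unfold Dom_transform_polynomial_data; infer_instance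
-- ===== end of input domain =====

-- B builds the columns by cumulative elementwise products (col_{i+1} = col_i * xs, starting
-- from all ones), never evaluating x**i; objective: alternative algorithm, same asymptotic cost.

-- ===== PORT A =====
-- Row-major: build empty columns keyed '0'..'degree' and 'y', then for each row append
-- x**i to every column and y to 'y'.  `polynomial_dict[str(i)].append(v)` is ported as
-- `Dict.modify key [] (· ++ [v])`: exact here because the key is always present (i ∈ range);
-- `adjusted_data[i]` is ported as `pyGetD … 0`: exact because i is always in range.
def transform_polynomial_data (data : List (Int × Int)) (degree : Int) : List (String × List Int) :=
  let polynomial_dict : PySem.Dict String (List Int) :=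
    (PySem.List.pyRange 0 (degree + 1) 1).foldl
      (fun d i => d.insert (PySem.Int.toStr i) []) PySem.Dict.empty
  let polynomial_dict := polynomial_dict.update [("y", ([] : List Int))]
  let polynomial_dict := data.foldl (fun d xy =>
    let x := xy.1
    let y := xy.2
    let adjusted_data := (PySem.List.pyRange 0 (degree + 1) 1).map (fun i => x ^ i.toNat)
    let d := (PySem.List.pyRange 0 (degree + 1) 1).foldl
      (fun d i => d.modify (PySem.Int.toStr i) []
        (fun v => v ++ [PySem.List.pyGetD adjusted_data i 0])) d
    d.modify "y" [] (fun v => v ++ [y])) polynomial_dict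
  polynomial_dict.items

-- ===== PORT B =====
-- Column-major incremental products: loop state is (dict so far, current column);
-- each step inserts the current column under str(i) and multiplies it elementwise by xs.
def transform_polynomial_data_alt (data : List (Int × Int)) (degree : Int) : List (String × List Int) :=
  let xs := data.map (fun r => r.1)
  let st := (PySem.List.pyRange 0 (degree + 1) 1).foldl
    (fun (p : PySem.Dict String (List Int) × List Int) i =>
      (p.1.insert (PySem.Int.toStr i) p.2,
       (p.2.zip xs).map (fun q => q.1 * q.2)))
    (PySem.Dict.empty, List.replicate xs.length 1)
  (st.1.insert "y" (data.map (fun r => r.2))).items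

-- ===== PRECONDITION & SPEC =====
def Spec_transform_polynomial_data (data : List (Int × Int)) (degree : Int) (out : List (String × List Int)) : Prop := out = transform_polynomial_data_alt data degree
instance (data : List (Int × Int)) (degree : Int) (out : List (String × List Int)) : Decidable (Spec_transform_polynomial_data data degree out) := by unfold Spec_transform_polynomial_data; infer_instance

-- ===== CLAIM (what is proved, stated in full; the proofs are below) =====
def Claim_equal_transform_polynomial_data : Prop := ∀ (data : List (Int × Int)) (degree : Int), Dom_transform_polynomial_data data degree → Spec_transform_polynomial_data data degree (transform_polynomial_data data degree)

-- ===== LEMMAS AND PROOFS =====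

-- decimal digits: value of a digit character produced by Nat.digitChar
lemma pv_digitChar_val (m : Nat) (h : m < 10) : (Nat.digitChar m).toNat = 48 + m := by
  interval_cases m <;> rfl

-- evaluating Nat.toDigits 10 as a number recovers n (with any accumulator)
lemma pv_toDigits_val (n : Nat) : ∀ a : Nat,
    (Nat.toDigits 10 n).foldl (fun s c => 10 * s + (c.toNat - 48)) a
      = a * 10 ^ (Nat.toDigits 10 n).length + n := by
  induction n using Nat.strong_induction_on with
  | _ n ih =>
    intro a
    by_cases h : n < 10
    · rw [Nat.toDigits_of_lt_base h]
      simp [List.foldl, pv_digitChar_val n h]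
      omega
    · rw [Nat.toDigits_of_base_le (by norm_num) (le_of_not_gt h)]
      rw [List.foldl_append, List.length_append]
      rw [ih (n / 10) (Nat.div_lt_self (by omega) (by norm_num)) a]
      simp [List.foldl, pv_digitChar_val (n % 10) (Nat.mod_lt n (by norm_num))]
      rw [pow_succ]
      generalize (10 : Nat) ^ (Nat.toDigits 10 (n / 10)).length = P
      have hQ : a * (P * 10) = a * P * 10 := by ring
      rw [hQ]
      generalize a * P = Q
      omega

lemma pv_toDigits10_inj {m n : Nat} (h : Nat.toDigits 10 m = Nat.toDigits 10 n) : m = n := by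
  have h1 := pv_toDigits_val m 0
  have h2 := pv_toDigits_val n 0
  rw [h] at h1
  simp at h1 h2
  omega

lemma pv_toStr_inj_nonneg {i j : Int} (hi : 0 ≤ i) (hj : 0 ≤ j)
    (h : PySem.Int.toStr i = PySem.Int.toStr j) : i = j := by
  unfold PySem.Int.toStr PySem.Int.toChars at h
  rw [if_neg (by omega), if_neg (by omega)] at h
  have := pv_toDigits10_inj (String.ofList_inj.mp h)
  omega

lemma pv_toStr_ne_y {i : Int} (hi : 0 ≤ i) : PySem.Int.toStr i ≠ "y" := by
  unfold PySem.Int.toStr PySem.Int.toChars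
  rw [if_neg (by omega)]
  intro h
  have h' : Nat.toDigits 10 i.toNat = ['y'] := by
    have := congrArg String.toList h
    simpa using this
  have hv := pv_toDigits_val i.toNat 0
  rw [h'] at hv
  simp [List.foldl] at hv
  rw [show i.toNat = 73 by omega] at h'
  exact absurd h' (by decide)

-- inserting a key absent from a dict appends the pair
lemma pv_insert_fresh {ν : Type} (d : PySem.Dict String ν) (k : String) (v : ν)
    (h : ∀ p ∈ d.items, p.1 ≠ k) : d.insert k v = PySem.Dict.mk (d.items ++ [(k, v)]) := by
  have hc : d.contains k = false := by
    simp [PySem.Dict.contains, List.any_eq_false]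
    exact fun a b hab => h (a, b) hab
  simp [PySem.Dict.insert, hc]

-- modify at a key occurring exactly once rewrites that entry in place
lemma pv_modify_mid {ν : Type} (pre rest : List (String × ν)) (k : String) (v : ν)
    (d0 : ν) (f : ν → ν) (hpre : ∀ p ∈ pre, p.1 ≠ k) (hrest : ∀ p ∈ rest, p.1 ≠ k) :
    PySem.Dict.modify (PySem.Dict.mk (pre ++ (k, v) :: rest)) k d0 f
      = PySem.Dict.mk (pre ++ (k, f v) :: rest) := by
  have hfind : List.find? (fun p => p.1 == k) pre = none := by
    rw [List.find?_eq_none]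
    intro p hp
    simpa using hpre p hp
  have hc : (PySem.Dict.mk (pre ++ (k, v) :: rest)).contains k = true := by
    simp [PySem.Dict.contains]
  unfold PySem.Dict.modify
  simp [PySem.Dict.insert, hc, PySem.Dict.getD, PySem.Dict.get?, List.find?_append, hfind]
  have e1 : pre.map (fun p => if p.1 = k then (k, f v) else p) = pre :=
    (List.map_congr_left (fun p hp => by simp [hpre p hp])).trans (List.map_id pre)
  have e2 : rest.map (fun p => if p.1 = k then (k, f v) else p) = rest :=
    (List.map_congr_left (fun p hp => by simp [hrest p hp])).trans (List.map_id rest)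
  rw [e1, e2]

-- a fold of inserts of pairwise fresh keys appends the corresponding pairs
lemma pv_foldl_insert_map (c : Int → List Int) :
    ∀ (L : List Int) (acc : PySem.Dict String (List Int)),
      (L.map PySem.Int.toStr).Nodup →
      (∀ i ∈ L, ∀ p ∈ acc.items, p.1 ≠ PySem.Int.toStr i) →
      L.foldl (fun d i => d.insert (PySem.Int.toStr i) (c i)) acc
        = PySem.Dict.mk (acc.items ++ L.map (fun i => (PySem.Int.toStr i, c i))) := by
  intro L
  induction L with
  | nil => intro acc _ _; simp
  | cons a tl ih =>
    intro acc hnd hfresh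
    simp only [List.foldl_cons]
    rw [pv_insert_fresh acc _ _ (fun p hp => hfresh a (by simp) p hp)]
    rw [ih _ (by simpa using hnd.of_cons) ?_]
    · simp
    · intro i hi p hp
      rcases List.mem_append.mp hp with h1 | h1
      · exact hfresh i (by simp [hi]) p h1
      · simp at h1
        subst h1
        intro hEq
        exact (List.nodup_cons.mp hnd).1
          (by rw [show PySem.Int.toStr a = PySem.Int.toStr i from hEq]
              exact List.mem_map_of_mem hi)

-- one multiplicative step: (xs.map (·^e)) zipped with xs and multiplied is xs.map (·^(e+1))
lemma pv_col_step (xs : List Int) (e : Nat) :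
    ((xs.map (fun x => x ^ e)).zip xs).map (fun q => q.1 * q.2)
      = xs.map (fun x => x ^ (e + 1)) := by
  induction xs with
  | nil => rfl
  | cons a t ih => simpa [pow_succ, mul_comm] using ih

-- B's pair fold, characterised: starting the column at xs.map (·^k), the dict component
-- collects the power columns keyed by each range element
lemma pv_fold_pair (xs : List Int) (b : Int) : ∀ (n : Nat) (k : Int), 0 ≤ k →
    n = (b - k).toNat →
    ∀ acc : PySem.Dict String (List Int),
    ((PySem.List.pyRange k b 1).foldl
      (fun (p : PySem.Dict String (List Int) × List Int) i =>
        (p.1.insert (PySem.Int.toStr i) p.2,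
         (p.2.zip xs).map (fun q => q.1 * q.2)))
      (acc, xs.map (fun x => x ^ k.toNat))).1
    = (PySem.List.pyRange k b 1).foldl
        (fun d i => d.insert (PySem.Int.toStr i) (xs.map (fun x => x ^ i.toNat))) acc := by
  intro n
  induction n with
  | zero =>
    intro k hk hn acc
    rw [PySem.List.pyRange_one_eq_nil (by omega)]
    simp
  | succ m ih =>
    intro k hk hn acc
    rw [PySem.List.pyRange_one_cons (by omega)]
    simp only [List.foldl_cons]
    rw [pv_col_step xs k.toNat]
    rw [show k.toNat + 1 = (k + 1).toNat by omega]
    exact ih (k + 1) (by omega) (by omega) _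

-- the per-row inner loop: appending g i to every column i ∈ L, in place
lemma pv_foldl_modify_map (g : Int → Int) :
    ∀ (L : List Int) (pre rest : List (String × List Int)) (c : Int → List Int),
      (L.map PySem.Int.toStr).Nodup →
      (∀ i ∈ L, ∀ p ∈ pre, p.1 ≠ PySem.Int.toStr i) →
      (∀ i ∈ L, ∀ p ∈ rest, p.1 ≠ PySem.Int.toStr i) →
      L.foldl (fun d i => d.modify (PySem.Int.toStr i) [] (fun v => v ++ [g i]))
          (PySem.Dict.mk (pre ++ L.map (fun i => (PySem.Int.toStr i, c i)) ++ rest))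
        = PySem.Dict.mk (pre ++ L.map (fun i => (PySem.Int.toStr i, c i ++ [g i])) ++ rest) := by
  intro L
  induction L with
  | nil => intro pre rest c _ _ _; simp
  | cons a tl ih =>
    intro pre rest c hnd hpre hrest
    simp only [List.foldl_cons, List.map_cons, List.cons_append, List.append_assoc] at *
    have hstep := pv_modify_mid pre (tl.map (fun i => (PySem.Int.toStr i, c i)) ++ rest)
        (PySem.Int.toStr a) (c a) [] (fun v => v ++ [g a])
        (fun p hp => hpre a (by simp) p hp) ?_
    · rw [show pre ++ (PySem.Int.toStr a, c a) :: (tl.map (fun i => (PySem.Int.toStr i, c i)) ++ rest)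
            = pre ++ ((PySem.Int.toStr a, c a) :: (tl.map (fun i => (PySem.Int.toStr i, c i)) ++ rest)) from rfl]
      rw [hstep]
      have := ih (pre ++ [(PySem.Int.toStr a, c a ++ [g a])]) rest c
          (by simpa using hnd.of_cons) ?_ (fun i hi p hp => hrest i (by simp [hi]) p hp)
      · simpa [List.append_assoc] using this
      · intro i hi p hp
        rcases List.mem_append.mp hp with h1 | h1
        · exact hpre i (by simp [hi]) p h1
        · simp at h1
          subst h1
          intro hEq
          exact (List.nodup_cons.mp hnd).1
            (by rw [show PySem.Int.toStr a = PySem.Int.toStr i from hEq]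
                exact List.mem_map_of_mem hi)
    · intro p hp
      rcases List.mem_append.mp hp with h1 | h1
      · obtain ⟨i, hi, rfl⟩ := List.mem_map.mp h1
        intro hEq
        exact (List.nodup_cons.mp hnd).1
          (by rw [show PySem.Int.toStr a = PySem.Int.toStr i from hEq.symm]
              exact List.mem_map_of_mem hi)
      · exact hrest a (by simp) p h1

lemma pv_keys_nodup (degree : Int) :
    ((PySem.List.pyRange 0 (degree + 1) 1).map PySem.Int.toStr).Nodup := by
  apply List.Nodup.map_on ?_ (PySem.List.nodup_pyRange_one 0 (degree + 1))
  intro x hx y hy h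
  exact pv_toStr_inj_nonneg (PySem.List.mem_pyRange_one.mp hx).1
    (PySem.List.mem_pyRange_one.mp hy).1 h

lemma pv_key_ne_y (degree : Int) :
    ∀ i ∈ PySem.List.pyRange 0 (degree + 1) 1, PySem.Int.toStr i ≠ "y" := by
  intro i hi
  exact pv_toStr_ne_y (PySem.List.mem_pyRange_one.mp hi).1

-- A's outer loop, characterised: each processed row appends x^i to column i and y to 'y'
lemma pv_outer (degree : Int) :
    ∀ (rows : List (Int × Int)) (c : Int → List Int) (ys : List Int),
      rows.foldl (fun d xy =>
          let x := xy.1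
          let y := xy.2
          let adjusted_data := (PySem.List.pyRange 0 (degree + 1) 1).map (fun i => x ^ i.toNat)
          let d := (PySem.List.pyRange 0 (degree + 1) 1).foldl
            (fun d i => d.modify (PySem.Int.toStr i) []
              (fun v => v ++ [PySem.List.pyGetD adjusted_data i 0])) d
          d.modify "y" [] (fun v => v ++ [y]))
        (PySem.Dict.mk ((PySem.List.pyRange 0 (degree + 1) 1).map
            (fun i => (PySem.Int.toStr i, c i)) ++ [("y", ys)]))
      = PySem.Dict.mk ((PySem.List.pyRange 0 (degree + 1) 1).map
            (fun i => (PySem.Int.toStr i, c i ++ rows.map (fun r => r.1 ^ i.toNat)))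
          ++ [("y", ys ++ rows.map (fun r => r.2))]) := by
  intro rows
  induction rows with
  | nil => intro c ys; simp
  | cons r tl ih =>
    intro c ys
    simp only [List.foldl_cons]
    have hinner :
        (PySem.List.pyRange 0 (degree + 1) 1).foldl
          (fun d i => d.modify (PySem.Int.toStr i) []
            (fun v => v ++ [PySem.List.pyGetD
              ((PySem.List.pyRange 0 (degree + 1) 1).map (fun i => r.1 ^ i.toNat)) i 0]))
          (PySem.Dict.mk ((PySem.List.pyRange 0 (degree + 1) 1).map
              (fun i => (PySem.Int.toStr i, c i)) ++ [("y", ys)]))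
        = PySem.Dict.mk ((PySem.List.pyRange 0 (degree + 1) 1).map
              (fun i => (PySem.Int.toStr i, c i ++ [r.1 ^ i.toNat])) ++ [("y", ys)]) := by
      rw [PySem.List.foldl_congr_mem _ _
          (fun d i => d.modify (PySem.Int.toStr i) [] (fun v => v ++ [r.1 ^ i.toNat])) _ (by
        intro acc i hi
        have h0 := (PySem.List.mem_pyRange_one.mp hi).1
        have h1 := (PySem.List.mem_pyRange_one.mp hi).2
        rw [PySem.List.pyGetD_map_pyRange_of_nonneg _ _ _ _ h0 h1])]
      have := pv_foldl_modify_map (fun i => r.1 ^ i.toNat)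
          (PySem.List.pyRange 0 (degree + 1) 1) [] [("y", ys)] c
          (pv_keys_nodup degree) (by simp)
          (fun i hi p hp => by simp at hp; subst hp; exact Ne.symm (pv_key_ne_y degree i hi))
      simpa using this
    have hy :
        (PySem.Dict.mk ((PySem.List.pyRange 0 (degree + 1) 1).map
              (fun i => (PySem.Int.toStr i, c i ++ [r.1 ^ i.toNat])) ++ [("y", ys)])).modify
            "y" [] (fun v => v ++ [r.2])
        = PySem.Dict.mk ((PySem.List.pyRange 0 (degree + 1) 1).map
              (fun i => (PySem.Int.toStr i, c i ++ [r.1 ^ i.toNat])) ++ [("y", ys ++ [r.2])]) := by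
      have := pv_modify_mid
          ((PySem.List.pyRange 0 (degree + 1) 1).map
              (fun i => (PySem.Int.toStr i, c i ++ [r.1 ^ i.toNat]))) [] "y" ys []
          (fun v => v ++ [r.2])
          (fun p hp => by
            obtain ⟨i, hi, rfl⟩ := List.mem_map.mp hp
            exact pv_key_ne_y degree i hi) (by simp)
      simpa using this
    rw [hinner, hy]
    have hih := ih (fun j => c j ++ [r.1 ^ j.toNat]) (ys ++ [r.2])
    simp only [] at hih
    rw [hih]
    congr 1
    rw [List.append_assoc]
    congr 1
    exact List.map_congr_left (fun i _ => by simp)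

-- ===== VERDICT (by name: the statement is the Claim_ definition above) =====
theorem transform_polynomial_data_spec : Claim_equal_transform_polynomial_data := by
  intro data degree _
  unfold Spec_transform_polynomial_data
  unfold transform_polynomial_data transform_polynomial_data_alt
  simp only []
  -- B's dict: start column is the exponent-0 column, then pv_fold_pair
  rw [show List.replicate (data.map (fun r => r.1)).length (1 : Int)
        = (data.map (fun r => r.1)).map (fun x => x ^ (0 : Int).toNat) by
      simp [Function.comp_def, List.map_const']]
  rw [pv_fold_pair (data.map (fun r => r.1)) (degree + 1) ((degree + 1) - 0).toNat 0
      le_rfl rfl PySem.Dict.empty]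
  rw [pv_foldl_insert_map (fun i => (data.map (fun r => r.1)).map (fun x => x ^ i.toNat)) _
      PySem.Dict.empty (pv_keys_nodup degree) (by intro i _ p hp; simp [PySem.Dict.empty] at hp)]
  rw [pv_insert_fresh _ "y" _ (by
      intro p hp
      simp [PySem.Dict.empty] at hp
      obtain ⟨i, ⟨hi0, hi1⟩, rfl⟩ := hp
      exact pv_toStr_ne_y hi0)]
  -- A's dict
  rw [pv_foldl_insert_map (fun _ => ([] : List Int)) _ PySem.Dict.empty
      (pv_keys_nodup degree) (by intro i _ p hp; simp [PySem.Dict.empty] at hp)]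
  simp only [PySem.Dict.update, List.foldl_cons, List.foldl_nil]
  rw [pv_insert_fresh _ "y" _ (by
      intro p hp
      simp [PySem.Dict.empty] at hp
      obtain ⟨i, ⟨hi0, hi1⟩, rfl⟩ := hp
      exact pv_toStr_ne_y hi0)]
  rw [show (PySem.Dict.mk ((PySem.Dict.mk (PySem.Dict.empty.items ++ (PySem.List.pyRange 0 (degree + 1) 1).map (fun i => (PySem.Int.toStr i, ([] : List Int))))).items ++ [("y", ([] : List Int))]))
      = PySem.Dict.mk ((PySem.List.pyRange 0 (degree + 1) 1).map (fun i => (PySem.Int.toStr i, ([] : List Int))) ++ [("y", ([] : List Int))]) from by simp [PySem.Dict.empty]]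
  rw [pv_outer degree data (fun _ => []) []]
  simp [PySem.Dict.empty, List.map_map, Function.comp]
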